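-- pv_equiv track=rewrite | github.com/MrBrantCode/unitest_baseline | mut_generate/mist_train_cf/cf_66374/solution.py | lucas_sequence_analysis
-- ===== SOURCE A (Python) =====
-- def lucas_sequence_analysis(N):
--     def is_fibonacci(n):
--         a, b = 0, 1
--         while a < n:
--             a, b = b, a+b
--         return n == a
--
--     def is_perfect(n):
--         sum = 1
--         i = 2
--         while i * i <= n:
--             if n % i:
--                 i += 1
--             elif i * (n // i) == n:
--                 sum = sum + i + n//i
--                 i += 1
--         return sum == n and n!=1
--
--     lucas = [2, 1]
--     for i in range(2, N):
--         lucas.append(lucas[-1] + lucas[-2])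
--
--     perfect_numbers = [(i, num) for i, num in enumerate(lucas) if is_perfect(num)]
--     fibonacci_numbers = [(i, num) for i, num in enumerate(lucas) if is_fibonacci(num)]
--
--     return len(perfect_numbers), len(fibonacci_numbers), perfect_numbers, fibonacci_numbers
-- ===== SOURCE B (Python) =====
-- def lucas_sequence_analysis(N):
--     # Same return value as the original; restructured: divisor-sum check in a single
--     # plain loop, Fibonacci numbers precomputed once up to max(lucas), and one merged
--     # pass over enumerate(lucas) instead of two comprehensions that each rescan.
--     def is_perfect(n):
--         s = 1
--         d = 2
--         while d * d <= n:
--             if n % d == 0: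
--                 s += d + n // d
--             d += 1
--         return s == n and n != 1
--
--     lucas = [2, 1]
--     for _ in range(2, N):
--         lucas.append(lucas[-1] + lucas[-2])
--
--     mx = max(lucas)
--     fibs = []
--     a, b = 0, 1
--     while a <= mx:
--         fibs.append(a)
--         a, b = b, a + b
--
--     perfect_numbers = []
--     fibonacci_numbers = []
--     for i, num in enumerate(lucas):
--         if is_perfect(num):
--             perfect_numbers.append((i, num))
--         if num in fibs:
--             fibonacci_numbers.append((i, num))
--
--     return len(perfect_numbers), len(fibonacci_numbers), perfect_numbers, fibonacci_numbers
-- ===== Notes on version B (the rewrite author's own statement) =====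
-- stated objective: alternative
-- what changed: B precomputes the Fibonacci numbers up to max(lucas) once and makes a single merged pass over enumerate(lucas) collecting both lists, instead of two separate comprehensions each re-running the per-element Fibonacci loop; the divisor-sum check is folded into one plain loop.
import Mathlib
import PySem

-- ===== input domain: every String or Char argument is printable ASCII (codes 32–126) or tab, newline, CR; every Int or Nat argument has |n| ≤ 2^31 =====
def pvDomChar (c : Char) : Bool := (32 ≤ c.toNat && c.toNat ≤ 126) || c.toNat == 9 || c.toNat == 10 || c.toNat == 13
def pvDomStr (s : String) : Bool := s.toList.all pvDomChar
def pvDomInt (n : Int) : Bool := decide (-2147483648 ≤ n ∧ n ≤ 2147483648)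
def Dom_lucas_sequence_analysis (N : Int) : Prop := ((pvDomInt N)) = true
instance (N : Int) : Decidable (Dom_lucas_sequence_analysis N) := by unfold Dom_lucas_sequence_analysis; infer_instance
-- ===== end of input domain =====

-- B precomputes a Fibonacci table up to max(lucas) once and makes one merged pass over
-- enumerate(lucas) instead of two comprehensions that each rerun the Fibonacci loop (alternative).

-- ===== PORT A =====

-- A's inner `while a < n: a, b = b, a+b`.  The invariants 0 ≤ a ≤ b, 1 ≤ b hold at the
-- initial call (0, 1) and are preserved; they are carried as hypotheses for termination.
def pvFibLoopA (n a b : Int) (ha : 0 ≤ a) (hab : a ≤ b) (hb : 1 ≤ b) : Bool :=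
  if h : a < n then pvFibLoopA n b (a + b) (by omega) (by omega) (by omega)
  else n == a
termination_by ((n - a).toNat + (n - b).toNat)
decreasing_by omega

def pvIsFibA (n : Int) : Bool := pvFibLoopA n 0 1 (by norm_num) (by norm_num) (by norm_num)

-- A's is_perfect while-loop.  When n % i == 0, the elif test i*(n//i) == n is always true
-- for ints (floordiv identity), so its else branch is unreachable (in Python the state
-- would be unchanged there and the loop would never terminate); we return false there.
def pvPerfLoopA (n sum i : Int) : Bool :=
  if h : i * i ≤ n then
    if PySem.Int.mod n i ≠ 0 then pvPerfLoopA n sum (i + 1)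
    else if i * (PySem.Int.floordiv n i) = n then
      pvPerfLoopA n (sum + i + PySem.Int.floordiv n i) (i + 1)
    else false
  else sum == n && n != 1
termination_by (n + 1 - i).toNat
decreasing_by
  all_goals
    have hii : i ≤ i * i := by nlinarith [mul_self_nonneg (2 * i - 1)]
    omega

def pvIsPerfectA (n : Int) : Bool := pvPerfLoopA n 1 2

-- lucas = [2,1]; for i in range(2,N): lucas.append(lucas[-1] + lucas[-2])
-- (the indices -1, -2 are always in range: the list never shrinks below length 2)
def pvLucasA (N : Int) : List Int :=
  (PySem.List.pyRange 2 N 1).foldl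
    (fun l _ => l ++ [PySem.List.pyGetD l (-1) 0 + PySem.List.pyGetD l (-2) 0]) [2, 1]

def lucas_sequence_analysis (N : Int) : Int × Int × (List (Int × Int)) × (List (Int × Int)) :=
  let lucas := pvLucasA N
  let perfect_numbers := (PySem.List.enumerate lucas).filter (fun p => pvIsPerfectA p.2)
  let fibonacci_numbers := (PySem.List.enumerate lucas).filter (fun p => pvIsFibA p.2)
  ((perfect_numbers.length : Int), (fibonacci_numbers.length : Int),
   perfect_numbers, fibonacci_numbers)

-- ===== PORT B =====

-- B's is_perfect: one plain trial-division loop accumulating the divisor sum.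
def pvPerfLoopB (n s d : Int) : Bool :=
  if h : d * d ≤ n then
    pvPerfLoopB n (if PySem.Int.mod n d = 0 then s + d + PySem.Int.floordiv n d else s) (d + 1)
  else s == n && n != 1
termination_by (n + 1 - d).toNat
decreasing_by
  have hdd : d ≤ d * d := by nlinarith [mul_self_nonneg (2 * d - 1)]
  omega

def pvIsPerfectB (n : Int) : Bool := pvPerfLoopB n 1 2

-- B's `while a <= mx: fibs.append(a); a, b = b, a+b`, same invariants as A's fib loop.
def pvFibGen (mx a b : Int) (ha : 0 ≤ a) (hab : a ≤ b) (hb : 1 ≤ b) : List Int :=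
  if h : a ≤ mx then a :: pvFibGen mx b (a + b) (by omega) (by omega) (by omega)
  else []
termination_by ((mx + 1 - a).toNat + (mx + 1 - b).toNat)
decreasing_by omega

def pvLucasB (N : Int) : List Int :=
  (PySem.List.pyRange 2 N 1).foldl
    (fun l _ => l ++ [PySem.List.pyGetD l (-1) 0 + PySem.List.pyGetD l (-2) 0]) [2, 1]

-- B's merged pass: for i, num in enumerate(lucas): collect into both lists.
def pvScanB (fibs : List Int) : List (Int × Int) → List (Int × Int) × List (Int × Int)
  | [] => ([], [])
  | p :: rest =>
    let (pe, fi) := pvScanB fibs rest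
    ((if pvIsPerfectB p.2 then p :: pe else pe),
     (if fibs.contains p.2 then p :: fi else fi))

def lucas_sequence_analysis_alt (N : Int) : Int × Int × (List (Int × Int)) × (List (Int × Int)) :=
  let lucas := pvLucasB N
  -- max(lucas): lucas is never empty, so the default is never used
  let mx := (PySem.List.max? lucas (fun x => x)).getD 0
  let fibs := pvFibGen mx 0 1 (by norm_num) (by norm_num) (by norm_num)
  let pf := pvScanB fibs (PySem.List.enumerate lucas)
  ((pf.1.length : Int), (pf.2.length : Int), pf.1, pf.2)

-- ===== PRECONDITION & SPEC =====
def Spec_lucas_sequence_analysis (N : Int) (out : Int × Int × (List (Int × Int)) × (List (Int × Int))) : Prop := out = lucas_sequence_analysis_alt N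
instance (N : Int) (out : Int × Int × (List (Int × Int)) × (List (Int × Int))) : Decidable (Spec_lucas_sequence_analysis N out) := by unfold Spec_lucas_sequence_analysis; infer_instance

-- ===== CLAIM (what is proved, stated in full; the proofs are below) =====
def Claim_equal_lucas_sequence_analysis : Prop := ∀ (N : Int), Dom_lucas_sequence_analysis N → Spec_lucas_sequence_analysis N (lucas_sequence_analysis N)

-- ===== LEMMAS AND PROOFS =====

theorem pvPerfLoop_eq (n sum i : Int) : pvPerfLoopA n sum i = pvPerfLoopB n sum i := by
  refine pvPerfLoopA.induct n (motive := fun sum i => pvPerfLoopA n sum i = pvPerfLoopB n sum i)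
    ?_ ?_ ?_ ?_ sum i
  · intro sum i h hne ih
    rw [pvPerfLoopA, pvPerfLoopB]
    have hz : ¬ PySem.Int.mod n i = 0 := by simpa using hne
    rw [dif_pos h, if_pos hne, dif_pos h, if_neg hz]
    exact ih
  · intro sum i h hne heq ih
    rw [pvPerfLoopA, pvPerfLoopB]
    have hz : PySem.Int.mod n i = 0 := by by_contra hc; exact hne (by simpa using hc)
    rw [dif_pos h, if_neg hne, if_pos heq, dif_pos h, if_pos hz]
    exact ih
  · -- unreachable: mod n i = 0 forces i * (n // i) = n
    intro sum i h hne heq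
    exfalso
    have hid := PySem.Int.floordiv_mul_add_mod n i
    have hz : PySem.Int.mod n i = 0 := by by_contra hc; exact hne (by simpa using hc)
    exact heq (by linarith [mul_comm (PySem.Int.floordiv n i) i])
  · intro sum i h
    rw [pvPerfLoopA, pvPerfLoopB, dif_neg h, dif_neg h]

theorem pvFibGen_ge (mx : Int) : ∀ (a b : Int) (ha : 0 ≤ a) (hab : a ≤ b) (hb : 1 ≤ b),
    ∀ x ∈ pvFibGen mx a b ha hab hb, a ≤ x := by
  refine pvFibGen.induct mx (motive := fun a b ha hab hb => ∀ x ∈ pvFibGen mx a b ha hab hb, a ≤ x)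
    ?_ ?_
  · intro a b ha hab hb h ih x hx
    rw [pvFibGen, dif_pos h] at hx
    rcases List.mem_cons.mp hx with rfl | hx
    · exact le_refl x
    · exact le_trans hab (ih x hx)
  · intro a b ha hab hb h x hx
    rw [pvFibGen, dif_neg h] at hx
    exact absurd hx (List.not_mem_nil)

theorem pvFibLoop_eq_contains (mx n : Int) (hn : n ≤ mx) :
    ∀ (a b : Int) (ha : 0 ≤ a) (hab : a ≤ b) (hb : 1 ≤ b),
      pvFibLoopA n a b ha hab hb = (pvFibGen mx a b ha hab hb).contains n := by
  refine pvFibLoopA.induct n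
    (motive := fun a b ha hab hb => pvFibLoopA n a b ha hab hb = (pvFibGen mx a b ha hab hb).contains n)
    ?_ ?_
  · intro a b ha hab hb h ih
    have hmx : a ≤ mx := le_trans (le_of_lt h) hn
    rw [pvFibLoopA, dif_pos h, pvFibGen, dif_pos hmx]
    have hna : (n == a) = false := beq_eq_false_iff_ne.mpr (by omega)
    rw [List.contains_cons, hna, Bool.false_or]
    exact ih
  · intro a b ha hab hb h
    rw [pvFibLoopA, dif_neg h]
    by_cases hmx : a ≤ mx
    · rw [pvFibGen, dif_pos hmx, List.contains_cons]
      by_cases hna : n = a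
      · subst hna; simp
      · have htail : ((pvFibGen mx b (a + b) (by omega) (by omega) (by omega)).contains n) = false := by
          rw [List.contains_eq_any_beq]
          simp only [List.any_eq_false, beq_iff_eq]
          intro x hx hxe
          have := pvFibGen_ge mx b (a + b) (by omega) (by omega) (by omega) x hx
          omega
        rw [htail, beq_eq_false_iff_ne.mpr hna, Bool.false_or]
    · rw [pvFibGen, dif_neg hmx, List.contains_nil]
      exact beq_eq_false_iff_ne.mpr (by omega)

theorem pvScanB_eq (fibs : List Int) (l : List (Int × Int)) :
    pvScanB fibs l = (l.filter (fun p => pvIsPerfectB p.2),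
                      l.filter (fun p => fibs.contains p.2)) := by
  induction l with
  | nil => simp [pvScanB]
  | cons p rest ih =>
    simp [pvScanB, ih, List.filter_cons]

theorem pvLucas_ne_nil (N : Int) : pvLucasA N ≠ [] := by
  unfold pvLucasA
  have : ∀ (r : List Int) (acc : List Int), acc ≠ [] →
      r.foldl (fun l _ => l ++ [PySem.List.pyGetD l (-1) 0 + PySem.List.pyGetD l (-2) 0]) acc ≠ [] := by
    intro r
    induction r with
    | nil => intro acc h; simpa using h
    | cons x xs ih =>
      intro acc h
      simp only [List.foldl_cons]
      exact ih _ (by simp)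
  exact this _ [2, 1] (by simp)

theorem pvMem_le_max (x : Int) (l : List Int) (hl : l ≠ []) (hx : x ∈ l) :
    x ≤ (PySem.List.max? l (fun y => y)).getD 0 := by
  rcases hm : PySem.List.max? l (fun y => y) with _ | m
  · exact absurd ((PySem.List.max?_eq_none_iff l fun y => y).mp hm) hl
  · simpa using PySem.List.max?_isMax hm x hx

-- ===== VERDICT (by name: the statement is the Claim_ definition above) =====
theorem lucas_sequence_analysis_spec : Claim_equal_lucas_sequence_analysis := by
  intro N _
  unfold Spec_lucas_sequence_analysis lucas_sequence_analysis lucas_sequence_analysis_alt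
  have hlucas : pvLucasB N = pvLucasA N := rfl
  simp only [hlucas, pvScanB_eq]
  have hperf : List.filter (fun p => pvIsPerfectA p.2) (PySem.List.enumerate (pvLucasA N))
      = List.filter (fun p => pvIsPerfectB p.2) (PySem.List.enumerate (pvLucasA N)) :=
    List.filter_congr (fun p _ => by
      simp only [pvIsPerfectA, pvIsPerfectB, pvPerfLoop_eq])
  have hfib : List.filter (fun p => pvIsFibA p.2) (PySem.List.enumerate (pvLucasA N))
      = List.filter (fun (p : Int × Int) =>
          (pvFibGen ((PySem.List.max? (pvLucasA N) fun x => x).getD 0) 0 1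
            (by norm_num) (by norm_num) (by norm_num)).contains p.2)
          (PySem.List.enumerate (pvLucasA N)) :=
    List.filter_congr (fun p hp => by
      have hmem : p.2 ∈ pvLucasA N := by
        rw [PySem.List.mem_enumerate_iff] at hp
        rcases hp with ⟨k, hk, rfl⟩
        exact List.getElem_mem hk
      have hle := pvMem_le_max p.2 (pvLucasA N) (pvLucas_ne_nil N) hmem
      simp only [pvIsFibA]
      exact pvFibLoop_eq_contains _ p.2 hle 0 1 (by norm_num) (by norm_num) (by norm_num))
  rw [hperf, hfib]
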